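-- pv_equiv track=rewrite | github.com/boyu0906/FUNFUN | 15.7_enumerate_palindromic_decompositions.py | palindrome_decompositions
-- ===== SOURCE A (Python) =====
-- def palindrome_decompositions(input):
--     def helper(S, partial):
--         if len(''.join(partial)) == N:
--             result.append(partial)
--         for i in range(len(S)):
--             if is_palindrom(S[:i+1]):
--                 helper(S[i+1:], partial + [S[:i+1]])
--
--     def is_palindrom(S):
--         return S == S[::-1]
--     result = []
--     N = len(input)
--     helper(input, [])
--     return result
-- ===== SOURCE B (Python) =====
-- def palindrome_decompositions(input):
--     # Bottom-up DP over suffixes: decs[k] holds all palindromic decompositions of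
--     # input[n-k:], computed once; prev is the palindrome-DP row for i+1, giving O(1)
--     # palindrome tests via pal(i,j) = input[i]==input[j] and (j-i<2 or pal(i+1,j-1)).
--     n = len(input)
--     decs = [[[]]]
--     prev = []
--     for i in range(n - 1, -1, -1):
--         row = []
--         cur = []
--         for j in range(i, n):
--             p = input[i] == input[j] and (j - i < 2 or prev[j - i - 2])
--             row.append(p)
--             if p:
--                 piece = input[i:j + 1]
--                 for rest in decs[n - j - 1]:
--                     cur.append([piece] + rest)
--         prev = row
--         decs.append(cur)
--     return decs[n]
-- ===== Notes on version B (the rewrite author's own statement) =====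
-- stated objective: alternative
-- what changed: Replaces A's top-down recursion (which re-joins the partial list and re-checks each prefix palindrome by slicing at every node) with a bottom-up DP that computes the decomposition list of every suffix exactly once, using a palindrome-DP row for O(1) palindrome tests; on output-heavy inputs both remain bound by the output size, so no speed is claimed.
import Mathlib
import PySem

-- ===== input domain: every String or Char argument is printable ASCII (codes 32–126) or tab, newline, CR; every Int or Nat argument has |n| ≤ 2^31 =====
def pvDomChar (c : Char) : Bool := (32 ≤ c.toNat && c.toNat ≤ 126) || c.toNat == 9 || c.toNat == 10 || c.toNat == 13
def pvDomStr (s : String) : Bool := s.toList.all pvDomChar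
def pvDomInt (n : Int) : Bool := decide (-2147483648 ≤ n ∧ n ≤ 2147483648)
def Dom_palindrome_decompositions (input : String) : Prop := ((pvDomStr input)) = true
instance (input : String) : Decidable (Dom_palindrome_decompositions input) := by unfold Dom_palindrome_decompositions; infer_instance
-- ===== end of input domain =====

-- B replaces A's top-down recursion (which re-joins the accumulated list and re-checks
-- palindromes by slicing at every node) with a bottom-up DP over suffixes using a
-- palindrome-DP row: a structurally different algorithm with the same return value.

-- ===== PORT A =====
-- is_palindrom(S): S == S[::-1]  (strings modelled as List Char; step -1 never raises, so .getD [] is inert)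
def pdA_is_palindrom (S : List Char) : Bool :=
  S == (PySem.List.slice? S none none (-1)).getD []

-- helper(S, parts): appends parts when len(''.join(parts)) == N, then recurses on
-- every palindromic prefix S[:i+1]; the global 'result' list is modelled as the returned list.
def pdA_helper (N : Int) (S : List Char) (parts : List String) : List (List String) :=
  (if PySem.Str.len (PySem.Str.join "" parts) = N then [parts] else []) ++
  (PySem.List.pyRange 0 (S.length : Int) 1).attach.foldl
    (fun acc i =>
      if pdA_is_palindrom (PySem.List.slice S none (some (i.1 + 1))) then
        acc ++ pdA_helper N (PySem.List.slice S (some (i.1 + 1)) none)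
                 (parts ++ [String.ofList (PySem.List.slice S none (some (i.1 + 1)))])
      else acc) []
termination_by S.length
decreasing_by
  have h := PySem.List.mem_pyRange_one.mp i.2
  rw [PySem.List.slice_from S (by omega)]
  simp only [List.length_drop]
  omega

def palindrome_decompositions (input : String) : List (List String) :=
  pdA_helper (PySem.Str.len input) input.toList []

-- ===== PORT B =====
-- inner loop: for j in range(i, n): compute the palindrome-DP bit p from the previous row,
-- append it to row, and when p holds extend every decomposition of input[j+1:].
-- (All pyGetD accesses are in range whenever Python's are, so the defaults are inert.)
def pdB_inner (s : List Char) (n : Nat) (prev : List Bool)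
    (decs : List (List (List String))) (i : Nat) : List Bool × List (List String) :=
  (PySem.List.pyRange (i : Int) (n : Int) 1).foldl
    (fun st j =>
      let p := (PySem.List.pyGetD s (i : Int) ' ' == PySem.List.pyGetD s j ' ') &&
               (decide (j - (i : Int) < 2) || PySem.List.pyGetD prev (j - (i : Int) - 2) false)
      let row := st.1 ++ [p]
      if p then
        (row, st.2 ++ (PySem.List.pyGetD decs ((n : Int) - j - 1) []).map
                (fun rest => String.ofList (PySem.List.slice s (some (i : Int)) (some (j + 1))) :: rest))
      else (row, st.2)) ([], [])

-- outer loop 'for i in range(n-1, -1, -1)' as recursion on the count k of processed rows (i = n-1-k);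
-- state = (prev row, decs list); each step appends the new suffix-decomposition list.
def pdB_loop (s : List Char) (n : Nat) : Nat → List Bool × List (List (List String))
  | 0 => ([], [[[]]])
  | k + 1 =>
      let st := pdB_loop s n k
      let r := pdB_inner s n st.1 st.2 (n - (k + 1))
      (r.1, st.2 ++ [r.2])

def palindrome_decompositions_alt (input : String) : List (List String) :=
  PySem.List.pyGetD (pdB_loop input.toList input.toList.length input.toList.length).2
    (input.toList.length : Int) []

-- ===== PRECONDITION & SPEC =====
def Spec_palindrome_decompositions (input : String) (out : List (List String)) : Prop := out = palindrome_decompositions_alt input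
instance (input : String) (out : List (List String)) : Decidable (Spec_palindrome_decompositions input out) := by unfold Spec_palindrome_decompositions; infer_instance

-- ===== CLAIM (what is proved, stated in full; the proofs are below) =====
def Claim_equal_palindrome_decompositions : Prop := ∀ (input : String), Dom_palindrome_decompositions input → Spec_palindrome_decompositions input (palindrome_decompositions input)

-- ===== LEMMAS AND PROOFS =====

-- `l == l.reverse`, the common palindrome test of both sides
def palB (l : List Char) : Bool := l == l.reverse

-- reference value: all palindromic decompositions of S, ordered by first-piece length
def decsSpec (S : List Char) : List (List String) :=
  (if S.length = 0 then [[]] else []) ++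
  (List.range S.length).attach.flatMap (fun i =>
    if palB (S.take (i.1 + 1)) then
      (decsSpec (S.drop (i.1 + 1))).map (fun r => String.ofList (S.take (i.1 + 1)) :: r)
    else [])
termination_by S.length
decreasing_by
  have h := List.mem_range.mp i.2
  simp only [List.length_drop]
  omega

lemma attach_flatMap {α β : Type} (xs : List α) (h : α → List β) :
    xs.attach.flatMap (fun i => h i.1) = xs.flatMap h := by
  conv_rhs => rw [← List.attach_map_subtype_val xs]
  rw [List.flatMap_map]

lemma decsSpec_nil : decsSpec [] = [[]] := by
  rw [decsSpec]; simp

lemma decsSpec_ne (S : List Char) (h : S ≠ []) :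
    decsSpec S = (List.range S.length).flatMap (fun i =>
      if palB (S.take (i + 1)) then
        (decsSpec (S.drop (i + 1))).map (fun r => String.ofList (S.take (i + 1)) :: r)
      else []) := by
  rw [decsSpec, attach_flatMap (List.range S.length) (fun i =>
    if palB (S.take (i + 1)) then
      (decsSpec (S.drop (i + 1))).map (fun r => String.ofList (S.take (i + 1)) :: r)
    else [])]
  simp [List.length_eq_zero_iff, h]

lemma pal_bridge (S : List Char) : pdA_is_palindrom S = palB S := by
  simp [pdA_is_palindrom, palB, PySem.List.slice?_none_none_neg_one]

lemma join_nil_flatten (xss : List (List Char)) : PySem.Chars.join [] xss = xss.flatten := by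
  induction xss with
  | nil => simp [PySem.Chars.join_nil]
  | cons p rest ih =>
      cases rest with
      | nil => simp [PySem.Chars.join_singleton]
      | cons q r => rw [PySem.Chars.join_cons_cons]; simp_all

lemma len_join (parts : List String) :
    PySem.Str.len (PySem.Str.join "" parts) =
      ((parts.map (fun s => s.toList.length)).sum : Int) := by
  rw [PySem.Str.len_eq, PySem.Str.toList_join]
  show ((PySem.Chars.join "".toList _).length : Int) = _
  rw [show "".toList = ([] : List Char) from rfl, join_nil_flatten, List.length_flatten]
  simp [List.map_map, Function.comp_def]

-- palindrome step on a list with explicit first and last element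
lemma palB_cons_append (a b : Char) (m : List Char) :
    palB (a :: (m ++ [b])) = ((a == b) && palB m) := by
  rw [Bool.eq_iff_iff]
  simp only [palB, Bool.and_eq_true, beq_iff_eq]
  constructor
  · intro h
    have h2 := h
    rw [List.reverse_cons, List.reverse_append] at h2
    simp at h2
    exact ⟨h2.1, h2.2.1⟩
  · rintro ⟨rfl, hm⟩
    conv_lhs => rw [hm]
    simp [List.reverse_cons, List.reverse_append]

-- the middle slice identity: input[i:j+1] = input[i] :: input[i+1:j] ++ [input[j]]
lemma sub_decomp (s : List Char) (i j : Nat) (h2 : i + 1 ≤ j) (hj : j < s.length) :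
    (s.drop i).take (j + 1 - i) =
      s.getD i ' ' :: (((s.drop (i + 1)).take (j - 1 - i)) ++ [s.getD j ' ']) := by
  have hi : i < s.length := by omega
  rw [List.drop_eq_getElem_cons hi]
  have h1 : j + 1 - i = (j - i) + 1 := by omega
  rw [h1, List.take_succ_cons]
  have h3 : j - i = (j - 1 - i) + 1 := by omega
  rw [h3, List.take_add_one]
  have h4 : (List.drop (i+1) s)[j-1-i]? = some s[j] := by
    rw [List.getElem?_drop]
    have : i + 1 + (j - 1 - i) = j := by omega
    rw [this, List.getElem?_eq_getElem hj]
  rw [h4]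
  rw [List.getD_eq_getElem?_getD, List.getElem?_eq_getElem hi,
      List.getD_eq_getElem?_getD, List.getElem?_eq_getElem hj]
  simp

-- B's DP bit equals the real palindrome test
lemma pal_rec (s : List Char) (i j : Nat) (hij : i ≤ j) (hj : j < s.length) :
    ((s.getD i ' ' == s.getD j ' ') &&
      (decide ((j : Int) - (i : Int) < 2) ||
        PySem.List.pyGetD ((List.range (s.length - (i + 1))).map
          (fun t => palB ((s.drop (i + 1)).take (t + 1)))) ((j : Int) - (i : Int) - 2) false))
    = palB ((s.drop i).take (j + 1 - i)) := by
  have hi : i < s.length := by omega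
  rcases Nat.lt_or_ge j (i+2) with hcase | hcase
  · rcases Nat.eq_or_lt_of_le hij with rfl | hlt
    · have h5 : (s.drop i).take (i + 1 - i) = [s.getD i ' '] := by
        have h1 : i + 1 - i = 1 := by omega
        rw [h1, List.take_one, List.head?_drop]
        simp [List.getD_eq_getElem?_getD, List.getElem?_eq_getElem hi]
      rw [h5]
      simp [palB]
    · have hji : j = i + 1 := by omega
      subst hji
      rw [sub_decomp s i (i+1) (by omega) hj]
      have h6 : (s.drop (i+1)).take (i+1-1-i) = [] := by simp
      rw [h6, palB_cons_append]
      have hdec : (decide (((i+1 : Nat) : Int) - (i : Int) < 2)) = true := by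
        simp
      rw [hdec]
      simp [palB]
  · rw [sub_decomp s i j (by omega) hj, palB_cons_append]
    have hidx : (j : Int) - (i : Int) - 2 = ((j - i - 2 : Nat) : Int) := by omega
    rw [hidx, PySem.List.pyGetD_natCast]
    have hrange : j - i - 2 < s.length - (i + 1) := by omega
    have hlook : (List.map (fun t => palB (List.take (t + 1) (List.drop (i + 1) s)))
        (List.range (s.length - (i + 1)))).getD (j - i - 2) false
        = palB (List.take (j - 1 - i) (List.drop (i + 1) s)) := by
      rw [List.getD_eq_getElem?_getD, List.getElem?_map, List.getElem?_range hrange]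
      have harg : j - i - 2 + 1 = j - 1 - i := by omega
      simp [harg]
    rw [hlook]
    have hdec : (decide ((j:Int) - (i:Int) < 2)) = false := by simp; omega
    rw [hdec]
    simp


lemma foldl_append_if_list {α β : Type} (p : α → Bool) (g : α → List β) (l : List α) (acc : List β) :
    l.foldl (fun acc x => if p x then acc ++ g x else acc) acc
      = acc ++ l.flatMap (fun x => if p x then g x else []) := by
  induction l generalizing acc with
  | nil => simp
  | cons x xs ih =>
      simp only [List.foldl_cons, List.flatMap_cons]
      cases h : p x <;> simp [ih, List.append_assoc]

lemma helper_eq (N : Int) :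
    ∀ (n : Nat) (S : List Char) (parts : List String), S.length = n →
    ((parts.map (fun s => s.toList.length)).sum : Int) + (S.length : Int) = N →
    pdA_helper N S parts = (decsSpec S).map (fun r => parts ++ r) := by
  intro n
  induction n using Nat.strong_induction_on with
  | _ n ih =>
    intro S parts hlen hsum
    rw [pdA_helper, decsSpec]
    rw [foldl_append_if_list]
    rw [attach_flatMap (PySem.List.pyRange 0 (S.length:Int) 1) (fun x =>
      if pdA_is_palindrom (PySem.List.slice S none (some (x + 1))) then
        pdA_helper N (PySem.List.slice S (some (x + 1)) none)
          (parts ++ [String.ofList (PySem.List.slice S none (some (x + 1)))])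
      else [])]
    rw [attach_flatMap (List.range S.length) (fun i =>
      if palB (S.take (i + 1)) then
        (decsSpec (S.drop (i + 1))).map (fun r => String.ofList (S.take (i + 1)) :: r)
      else [])]
    rw [PySem.List.pyRange_zero_nat, List.flatMap_map]
    rw [List.map_append]
    congr 1
    · have hiff : (PySem.Str.len (PySem.Str.join "" parts) = N) ↔ S.length = 0 := by
        rw [len_join]; omega
      by_cases hS : S.length = 0
      · rw [if_pos (hiff.mpr hS), if_pos hS]; simp
      · rw [if_neg (fun h => hS (hiff.mp h)), if_neg hS]; simp
    · simp only [List.nil_append, List.map_flatMap]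
      rw [List.flatMap_def, List.flatMap_def]
      congr 1
      apply List.map_congr_left
      intro a ha
      have ha' : a < S.length := List.mem_range.mp ha
      have hc : ((a : Int) + 1) = ((a + 1 : Nat) : Int) := by push_cast; ring
      rw [hc, PySem.List.slice_to_natCast, PySem.List.slice_from_natCast, pal_bridge]
      cases hpal : palB (S.take (a + 1)) with
      | false => simp
      | true =>
        simp only [if_true]
        have hlt : (S.drop (a + 1)).length < n := by
          simp only [List.length_drop]; omega
        rw [ih _ hlt (S.drop (a + 1)) _ rfl (by
          simp only [List.map_append, List.sum_append, List.map_cons, List.map_nil,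
            String.toList_ofList, List.length_take, List.length_drop, List.sum_cons, List.sum_nil]
          push_cast
          omega)]
        rw [List.map_map]
        apply List.map_congr_left
        intro r _
        simp

def rowSpec (s : List Char) (i : Nat) : List Bool :=
  (List.range (s.length - i)).map (fun t => palB ((s.drop i).take (t + 1)))

lemma inner_fold (s : List Char) (i : Nat) (hi : i < s.length) :
    ∀ (d c : Nat), s.length - (i + c) = d → i + c ≤ s.length →
    ∀ (row0 : List Bool) (cur0 : List (List String)),
    (PySem.List.pyRange ((i + c : Nat) : Int) (s.length : Int) 1).foldl
      (fun st j =>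
        let p := (PySem.List.pyGetD s (i : Int) ' ' == PySem.List.pyGetD s j ' ') &&
                 (decide (j - (i : Int) < 2) ||
                   PySem.List.pyGetD (rowSpec s (i + 1)) (j - (i : Int) - 2) false)
        let row := st.1 ++ [p]
        if p then
          (row, st.2 ++ (PySem.List.pyGetD
              ((List.range (s.length - i)).map (fun m => decsSpec (s.drop (s.length - m))))
              ((s.length : Int) - j - 1) []).map
            (fun rest => String.ofList (PySem.List.slice s (some (i : Int)) (some (j + 1))) :: rest))
        else (row, st.2)) (row0, cur0)
    = (row0 ++ (List.range (s.length - (i + c))).map (fun t => palB ((s.drop i).take (c + t + 1))),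
       cur0 ++ (List.range (s.length - (i + c))).flatMap (fun t =>
          if palB ((s.drop i).take (c + t + 1)) then
            (decsSpec (s.drop (i + c + t + 1))).map
              (fun r => String.ofList ((s.drop i).take (c + t + 1)) :: r)
          else [])) := by
  intro d
  induction d with
  | zero =>
      intro c hd hc row0 cur0
      have : ((i + c : Nat) : Int) ≥ (s.length : Int) := by omega
      rw [PySem.List.pyRange_one_eq_nil this]
      have h0 : s.length - (i + c) = 0 := hd
      rw [h0]
      simp
  | succ d ihd =>
      intro c hd hc row0 cur0
      have hlt : ((i + c : Nat) : Int) < (s.length : Int) := by omega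
      rw [PySem.List.pyRange_one_cons hlt]
      rw [List.foldl_cons]
      -- evaluate the step at j = i + c
      have hjc : i + c < s.length := by omega
      have hp : ((PySem.List.pyGetD s (i : Int) ' ' == PySem.List.pyGetD s ((i + c : Nat) : Int) ' ') &&
                 (decide (((i + c : Nat) : Int) - (i : Int) < 2) ||
                   PySem.List.pyGetD (rowSpec s (i + 1)) (((i + c : Nat) : Int) - (i : Int) - 2) false))
               = palB ((s.drop i).take (c + 1)) := by
        rw [PySem.List.pyGetD_natCast, PySem.List.pyGetD_natCast, rowSpec]
        have := pal_rec s i (i + c) (by omega) hjc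
        have harg : i + c + 1 - i = c + 1 := by omega
        rw [harg] at this
        exact this
      have hlook : PySem.List.pyGetD
            ((List.range (s.length - i)).map (fun m => decsSpec (s.drop (s.length - m))))
            ((s.length : Int) - ((i + c : Nat) : Int) - 1) []
          = decsSpec (s.drop (i + c + 1)) := by
        have hcast : (s.length : Int) - ((i + c : Nat) : Int) - 1 = ((s.length - i - c - 1 : Nat) : Int) := by omega
        rw [hcast, PySem.List.pyGetD_natCast, List.getD_eq_getElem?_getD, List.getElem?_map,
            List.getElem?_range (show s.length - i - c - 1 < s.length - i by omega)]
        have : s.length - (s.length - i - c - 1) = i + c + 1 := by omega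
        simp [this]
      have hpiece : PySem.List.slice s (some (i : Int)) (some (((i + c : Nat) : Int) + 1))
          = (s.drop i).take (c + 1) := by
        have hcast : ((i + c : Nat) : Int) + 1 = ((i + c + 1 : Nat) : Int) := by push_cast; ring
        rw [hcast, PySem.List.slice_natCast]
        congr 1
        omega
      simp only [hp, hlook, hpiece]
      have hd' : s.length - (i + (c + 1)) = d := by omega
      have hc' : i + (c + 1) ≤ s.length := by omega
      have hcast2 : ((i + c : Nat) : Int) + 1 = ((i + (c + 1) : Nat) : Int) := by push_cast; ring
      have hrange : s.length - (i + c) = (s.length - (i + (c + 1))) + 1 := by omega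
      cases hpal : palB ((s.drop i).take (c + 1)) with
      | true =>
          simp only [if_true]
          rw [hcast2, ihd (c + 1) hd' hc']
          rw [hrange, List.range_succ_eq_map]
          simp only [List.map_cons, List.flatMap_cons, List.map_map, List.flatMap_map]
          rw [hpal]
          simp only [Nat.add_zero, if_true]
          rw [Prod.mk.injEq]
          constructor
          · simp only [List.append_assoc, List.singleton_append]
            congr 1
            congr 1
            apply List.map_congr_left
            intro t _
            simp only [Function.comp_apply, Nat.succ_eq_add_one]
            congr 2
            omega
          · simp only [List.append_assoc]
            congr 2
            rw [List.flatMap_def, List.flatMap_def]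
            congr 1
            apply List.map_congr_left
            intro t _
            simp only [Nat.succ_eq_add_one]
            have e1 : c + 1 + t + 1 = c + (t + 1) + 1 := by omega
            have e2 : i + (c + 1) + t + 1 = i + c + (t + 1) + 1 := by omega
            rw [e1, e2]
      | false =>
          simp only [if_false, Bool.false_eq_true]
          rw [hcast2, ihd (c + 1) hd' hc']
          rw [hrange, List.range_succ_eq_map]
          simp only [List.map_cons, List.flatMap_cons, List.map_map, List.flatMap_map]
          rw [hpal]
          simp only [Nat.add_zero, Bool.false_eq_true, if_false, List.nil_append]
          rw [Prod.mk.injEq]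
          constructor
          · simp only [List.append_assoc, List.singleton_append]
            congr 1
            congr 1
            apply List.map_congr_left
            intro t _
            simp only [Function.comp_apply, Nat.succ_eq_add_one]
            congr 2
            omega
          · congr 1
            rw [List.flatMap_def, List.flatMap_def]
            congr 1
            apply List.map_congr_left
            intro t _
            simp only [Nat.succ_eq_add_one]
            have e1 : c + 1 + t + 1 = c + (t + 1) + 1 := by omega
            have e2 : i + (c + 1) + t + 1 = i + c + (t + 1) + 1 := by omega
            rw [e1, e2]

lemma inner_eq (s : List Char) (i : Nat) (hi : i < s.length) :
    pdB_inner s s.length (rowSpec s (i + 1))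
      ((List.range (s.length - i)).map (fun m => decsSpec (s.drop (s.length - m)))) i
    = (rowSpec s i, decsSpec (s.drop i)) := by
  unfold pdB_inner
  have h := inner_fold s i hi (s.length - i) 0 (by omega) (by omega) [] []
  simp only [Nat.add_zero, Nat.zero_add] at h
  rw [h]
  rw [Prod.mk.injEq]
  constructor
  · simp only [List.nil_append, rowSpec]
  · simp only [List.nil_append]
    rw [decsSpec_ne (s.drop i) (by
      intro hnil
      have := congrArg List.length hnil
      simp only [List.length_drop, List.length_nil] at this
      omega)]
    simp only [List.length_drop]
    rw [List.flatMap_def, List.flatMap_def]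
    congr 1
    apply List.map_congr_left
    intro t _
    rw [List.drop_drop]
    have e1 : i + t + 1 = i + (t + 1) := by omega
    rw [e1]

lemma loop_inv (s : List Char) : ∀ (k : Nat), k ≤ s.length →
    pdB_loop s s.length k =
      (rowSpec s (s.length - k),
       (List.range (k + 1)).map (fun m => decsSpec (s.drop (s.length - m)))) := by
  intro k
  induction k with
  | zero =>
      intro _
      rw [pdB_loop]
      rw [Prod.mk.injEq]
      constructor
      · simp [rowSpec]
      · simp [List.range_succ, List.drop_length, decsSpec_nil]
  | succ k ihk =>
      intro hk
      rw [pdB_loop, ihk (by omega)]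
      have e1 : s.length - k = (s.length - (k + 1)) + 1 := by omega
      have e2 : s.length - (s.length - (k + 1)) = k + 1 := by omega
      have h := inner_eq s (s.length - (k + 1)) (by omega)
      rw [e2] at h
      simp only [e1, h]
      rw [Prod.mk.injEq]
      constructor
      · rfl
      · conv_rhs => rw [List.range_succ, List.map_append]
        rfl

-- ===== VERDICT (by name: the statement is the Claim_ definition above) =====
theorem palindrome_decompositions_spec : Claim_equal_palindrome_decompositions := by
  intro input _
  unfold Spec_palindrome_decompositions palindrome_decompositions palindrome_decompositions_alt
  set s := input.toList with hs
  have hA : pdA_helper (PySem.Str.len input) s [] = decsSpec s := by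
    rw [helper_eq (PySem.Str.len input) s.length s [] rfl (by simp [PySem.Str.len_eq, hs])]
    simp
  have hB : PySem.List.pyGetD (pdB_loop s s.length s.length).2 (s.length : Int) [] = decsSpec s := by
    rw [loop_inv s s.length le_rfl, PySem.List.pyGetD_natCast]
    simp [List.getD_eq_getElem?_getD]
  rw [hA, hB]
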